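-- pv_equiv track=rewrite | github.com/joedanields/A-C-CS | streamlit_app.py | arrangements_with_forbidden
-- ===== SOURCE A (Python) =====
-- def arrangements_with_forbidden(n, r, forbidden_pairs):
--     from functools import lru_cache
--     all_items = tuple(range(n))
--     fset = set(tuple(p) for p in forbidden_pairs)
--
--     @lru_cache(maxsize=None)
--     def dp(mask, last):
--         used_count = mask.bit_count()
--         if used_count == r:
--             return 1
--         total = 0
--         for x in all_items:
--             bit = 1 << x
--             if mask & bit:
--                 continue
--             if last != -1 and (last, x) in fset:
--                 continue
--             total += dp(mask | bit, x)
--         return total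
--
--     return dp(0, -1)
-- ===== SOURCE B (Python) =====
-- def arrangements_with_forbidden(n, r, forbidden_pairs):
--     # Bottom-up level DP over (mask, last) states instead of memoized recursion.
--     if r == 0:
--         return 1
--     if r < 0 or r > n:
--         return 0
--     fset = set(tuple(p) for p in forbidden_pairs)
--     states = {(0, -1): 1}
--     for _ in range(r):
--         new_states = {}
--         for (mask, last), c in states.items():
--             for x in range(n):
--                 if (mask >> x) & 1 == 0 and (last == -1 or (last, x) not in fset):
--                     key = (mask | (1 << x), x)
--                     new_states[key] = new_states.get(key, 0) + c
--         states = new_states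
--     return sum(states.values())
-- ===== Notes on version B (the rewrite author's own statement) =====
-- stated objective: alternative
-- what changed: Replaces the lru_cache top-down recursion over (mask, last) with an iterative bottom-up level DP: a dict of reachable (mask, last) states with multiplicities is advanced r times and the surviving counts are summed, with r==0 -> 1 and r<0 or r>n -> 0 handled up front.
import Mathlib
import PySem

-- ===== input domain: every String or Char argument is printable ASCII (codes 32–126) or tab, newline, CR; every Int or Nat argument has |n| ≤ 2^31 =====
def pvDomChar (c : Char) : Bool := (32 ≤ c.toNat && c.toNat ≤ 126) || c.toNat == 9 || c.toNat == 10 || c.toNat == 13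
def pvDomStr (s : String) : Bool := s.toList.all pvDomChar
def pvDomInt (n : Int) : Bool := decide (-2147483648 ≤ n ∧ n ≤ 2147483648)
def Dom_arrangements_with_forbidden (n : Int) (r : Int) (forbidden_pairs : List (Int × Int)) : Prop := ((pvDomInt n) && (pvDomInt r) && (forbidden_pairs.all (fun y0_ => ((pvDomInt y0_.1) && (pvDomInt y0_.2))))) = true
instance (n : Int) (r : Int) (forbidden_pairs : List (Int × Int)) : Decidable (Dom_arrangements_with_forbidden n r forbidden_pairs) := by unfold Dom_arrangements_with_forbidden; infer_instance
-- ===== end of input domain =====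

-- B replaces A's memoized top-down recursion over (mask, last) by an iterative forward
-- level DP: a dict of reachable (mask, last) states with multiplicities, advanced r times.
-- Same return value everywhere; objective: alternative (no speed claim).

-- ===== PORT A =====
-- Termination measure for the dp recursion: how many of the n bit positions are still unset.
def pvUnusedA (N mask : Nat) : Nat := ((Finset.range N).filter (fun y => mask.testBit y = false)).card

lemma pvUnusedA_lt (N mask x : Nat) (hx : x < N) (hb : mask &&& (1 <<< x) = 0) :
    pvUnusedA N (mask ||| (1 <<< x)) < pvUnusedA N mask := by
  have hbit : mask.testBit x = false := by
    simpa [Nat.one_shiftLeft, Nat.and_two_pow] using hb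
  apply Finset.card_lt_card
  constructor
  · intro y hy
    simp only [Finset.mem_filter, Finset.mem_range, Nat.testBit_or] at hy ⊢
    exact ⟨hy.1, by simpa using (Bool.or_eq_false_iff.mp hy.2).1⟩
  · intro hsub
    have := hsub (by
      simp only [Finset.mem_filter, Finset.mem_range]
      exact ⟨hx, hbit⟩)
    simp only [Finset.mem_filter, Nat.testBit_or, Nat.one_shiftLeft,
      Nat.testBit_two_pow_self] at this
    simp at this

-- dp(mask, last) of A; the mask is a Python int that is always a nonnegative bitmask, kept as
-- a Nat (&&&, |||, <<< on Nat are Python-exact for nonnegative ints); mask.bit_count() is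
-- PySem.Int.bitCount.  The 'for x in all_items' loop is the recursion pvLoopA over the item
-- list (attached with its range membership, only to justify termination).
mutual
def pvDpA (N : Nat) (r : Int) (fset : List (Int × Int)) (mask : Nat) (last : Int) : Int :=
  if (PySem.Int.bitCount (mask : Int) : Int) = r then 1
  else pvLoopA N r fset mask last ((List.range N).attach) 0
termination_by (pvUnusedA N mask, N + 1)
decreasing_by exact Prod.Lex.right _ (by simp [List.length_attach])

def pvLoopA (N : Nat) (r : Int) (fset : List (Int × Int)) (mask : Nat) (last : Int)
    (xs : List {x // x ∈ List.range N}) (total : Int) : Int :=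
  match xs with
  | [] => total
  | x :: rest =>
    if mask &&& (1 <<< x.val) ≠ 0 then pvLoopA N r fset mask last rest total
    else if last ≠ -1 ∧ (last, (x.val : Int)) ∈ fset then pvLoopA N r fset mask last rest total
    else pvLoopA N r fset mask last rest
      (total + pvDpA N r fset (mask ||| (1 <<< x.val)) (x.val : Int))
termination_by (pvUnusedA N mask, xs.length)
decreasing_by
· exact Prod.Lex.right _ (by simp)
· exact Prod.Lex.right _ (by simp)
· exact Prod.Lex.left _ _ (pvUnusedA_lt N mask x.val (List.mem_range.mp x.property) (by omega))
· exact Prod.Lex.right _ (by simp)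
end

-- all_items = tuple(range(n)): empty for n ≤ 0, so n.toNat is exact; dp(0, -1) starts it.
def arrangements_with_forbidden (n : Int) (r : Int) (forbidden_pairs : List (Int × Int)) : Int :=
  pvDpA n.toNat r (PySem.Set.ofList forbidden_pairs) 0 (-1)

-- ===== PORT B =====
-- One level step: fold over states.items(), inner fold over range(n); the new dict merges
-- contributions with new_states[key] = new_states.get(key, 0) + c.
def pvStepB (N : Nat) (fset : List (Int × Int)) (d : PySem.Dict (Nat × Int) Int) :
    PySem.Dict (Nat × Int) Int :=
  d.items.foldl (fun acc (kv : (Nat × Int) × Int) =>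
    (List.range N).foldl (fun acc2 x =>
      if (kv.1.1 >>> x) &&& 1 = 0 ∧ (kv.1.2 = -1 ∨ (kv.1.2, (x : Int)) ∉ fset) then
        acc2.insert (kv.1.1 ||| (1 <<< x), (x : Int))
          (acc2.getD (kv.1.1 ||| (1 <<< x), (x : Int)) 0 + kv.2)
      else acc2) acc) PySem.Dict.empty

-- 'for _ in range(r)': r applications of the step.
def pvIterB (N : Nat) (fset : List (Int × Int)) :
    Nat → PySem.Dict (Nat × Int) Int → PySem.Dict (Nat × Int) Int
  | 0, d => d
  | t + 1, d => pvIterB N fset t (pvStepB N fset d)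

def arrangements_with_forbidden_alt (n : Int) (r : Int) (forbidden_pairs : List (Int × Int)) : Int :=
  if r = 0 then 1
  else if r < 0 ∨ n < r then 0
  else ((pvIterB n.toNat (PySem.Set.ofList forbidden_pairs) r.toNat
          (PySem.Dict.ofList [((0, -1), 1)])).values).sum

-- ===== PRECONDITION & SPEC =====
-- A's dp recursion nests r+1 deep (n+1 deep when r < 0 or r > n, the dead-end sweep); past
-- CPython's recursion limit it raises RecursionError.  Pre_ keeps that depth under 900 and so
-- excludes only deep-recursion inputs, on which A raises or never returns; A returns a value
-- on none of them.
def Pre_arrangements_with_forbidden (n : Int) (r : Int) (forbidden_pairs : List (Int × Int)) : Prop :=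
  r = 0 ∨ (1 ≤ r ∧ r ≤ n ∧ r < 900) ∨ (¬(1 ≤ r ∧ r ≤ n) ∧ n < 900)
instance (n : Int) (r : Int) (forbidden_pairs : List (Int × Int)) : Decidable (Pre_arrangements_with_forbidden n r forbidden_pairs) := by unfold Pre_arrangements_with_forbidden; infer_instance

def pvWitness_arrangements_with_forbidden : Int × Int × (List (Int × Int)) := (3, 2, [(0, 1)])

def Spec_arrangements_with_forbidden (n : Int) (r : Int) (forbidden_pairs : List (Int × Int)) (out : Int) : Prop := out = arrangements_with_forbidden_alt n r forbidden_pairs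
instance (n : Int) (r : Int) (forbidden_pairs : List (Int × Int)) (out : Int) : Decidable (Spec_arrangements_with_forbidden n r forbidden_pairs out) := by unfold Spec_arrangements_with_forbidden; infer_instance

-- ===== CLAIM (what is proved, stated in full; the proofs are below) =====
def Claim_equal_arrangements_with_forbidden : Prop := ∀ (n : Int) (r : Int) (forbidden_pairs : List (Int × Int)), Dom_arrangements_with_forbidden n r forbidden_pairs → Pre_arrangements_with_forbidden n r forbidden_pairs → Spec_arrangements_with_forbidden n r forbidden_pairs (arrangements_with_forbidden n r forbidden_pairs)

-- ===== LEMMAS AND PROOFS =====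

-- The common pass condition of both loops, and a parent's list of admissible child states.
def pvOk (fset : List (Int × Int)) (mask : Nat) (last : Int) (x : Nat) : Bool :=
  decide (mask &&& (1 <<< x) = 0 ∧ (last = -1 ∨ (last, (x : Int)) ∉ fset))

def pvKids (N : Nat) (fset : List (Int × Int)) (mask : Nat) (last : Int) : List (Nat × Int) :=
  ((List.range N).filter (pvOk fset mask last)).map (fun x => (mask ||| (1 <<< x), (x : Int)))

-- Weighted sum of a state dict against a valuation f of states.
def pvW (d : PySem.Dict (Nat × Int) Int) (f : Nat × Int → Int) : Int :=
  (d.items.map (fun p => p.2 * f p.1)).sum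

-- popcount facts ---------------------------------------------------------------------------
lemma pvPc_halve (m : Nat) :
    PySem.Int.bitCount (m : Int) = m % 2 + PySem.Int.bitCount ((m / 2 : Nat) : Int) := by
  rcases Nat.eq_zero_or_pos m with h | h
  · subst h; decide
  · exact PySem.Int.bitCount_natCast h

lemma mod2_or (m k : Nat) : (m ||| k) % 2 = m % 2 ||| k % 2 := by
  have h := Nat.testBit_or m k 0
  simp only [Nat.testBit_zero] at h
  rcases Nat.mod_two_eq_zero_or_one m with e1 | e1 <;>
    rcases Nat.mod_two_eq_zero_or_one k with e2 | e2 <;>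
    rcases Nat.mod_two_eq_zero_or_one (m ||| k) with e3 | e3 <;>
    simp_all

lemma pvPc_or (x : Nat) : ∀ m : Nat, m.testBit x = false →
    PySem.Int.bitCount ((m ||| 2 ^ x : Nat) : Int) = PySem.Int.bitCount (m : Int) + 1 := by
  induction x with
  | zero =>
    intro m h
    have hm2 : m % 2 = 0 := by simpa [Nat.testBit_zero] using h
    rw [pvPc_halve (m ||| 2 ^ 0), pvPc_halve m]
    have : (m ||| 2 ^ 0) / 2 = m / 2 := by
      simpa using Nat.or_div_two (a := m) (b := 1)
    rw [this, mod2_or, hm2]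
    push_cast
    omega
  | succ x ih =>
    intro m h
    have hdiv : (m ||| 2 ^ (x + 1)) / 2 = m / 2 ||| 2 ^ x := by
      have h2 := Nat.or_div_two (a := m) (b := 2 ^ (x + 1))
      have h3 : 2 ^ (x + 1) / 2 = 2 ^ x := by
        rw [Nat.pow_succ, Nat.mul_div_cancel _ (by norm_num : (0:Nat) < 2)]
      rw [h3] at h2; exact h2
    have hmod : (m ||| 2 ^ (x + 1)) % 2 = m % 2 := by
      rw [mod2_or]
      have : (2 ^ (x + 1)) % 2 = 0 := by
        simp [Nat.pow_succ, Nat.mul_mod_left]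
      simp [this]
    have htb : (m / 2).testBit x = false := by
      simpa [Nat.testBit_add_one] using h
    rw [pvPc_halve (m ||| 2 ^ (x + 1)), hdiv, hmod, ih _ htb, pvPc_halve m]
    push_cast; omega

lemma pvPc_le (N : Nat) : ∀ m : Nat, m < 2 ^ N → PySem.Int.bitCount (m : Int) ≤ N := by
  induction N with
  | zero => intro m h; interval_cases m; decide
  | succ N ih =>
    intro m h
    rw [pvPc_halve]
    have := ih (m / 2) (by omega)
    have := Nat.mod_two_eq_zero_or_one m
    omega

-- A-side loop characterisation --------------------------------------------------------------
lemma pvLoopA_eq (N : Nat) (r : Int) (fset : List (Int × Int)) (mask : Nat) (last : Int)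
    (xs : List {x // x ∈ List.range N}) (total : Int) :
    pvLoopA N r fset mask last xs total =
      total + (((xs.map Subtype.val).filter (pvOk fset mask last)).map
        (fun x => pvDpA N r fset (mask ||| (1 <<< x)) (x : Int))).sum := by
  induction xs generalizing total with
  | nil => simp [pvLoopA]
  | cons x rest ih =>
    rw [pvLoopA]
    by_cases h1 : mask &&& (1 <<< x.val) ≠ 0
    · simp only [if_pos h1, ih, List.map_cons, List.filter_cons]
      have : pvOk fset mask last x.val = false := by simp [pvOk]; intro h; omega
      simp [this]
    · by_cases h2 : last ≠ -1 ∧ (last, (x.val : Int)) ∈ fset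
      · simp only [if_neg h1, if_pos h2, ih, List.map_cons, List.filter_cons]
        have : pvOk fset mask last x.val = false := by
          simp only [pvOk, decide_eq_false_iff_not]
          rintro ⟨-, h | h⟩
          · exact h2.1 h
          · exact h h2.2
        simp [this]
      · simp only [if_neg h1, if_neg h2, ih, List.map_cons, List.filter_cons]
        have : pvOk fset mask last x.val = true := by
          simp only [pvOk, decide_eq_true_eq]
          refine ⟨by omega, ?_⟩
          by_cases hl : last = -1
          · exact Or.inl hl
          · exact Or.inr (fun hm => h2 ⟨hl, hm⟩)
        simp [this]
        ring

lemma pvDpA_eq (N : Nat) (r : Int) (fset : List (Int × Int)) (mask : Nat) (last : Int)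
    (h : (PySem.Int.bitCount (mask : Int) : Int) ≠ r) :
    pvDpA N r fset mask last =
      ((pvKids N fset mask last).map (fun k => pvDpA N r fset k.1 k.2)).sum := by
  rw [pvDpA, if_neg h, pvLoopA_eq]
  simp only [pvKids, List.attach_map_subtype_val, List.map_map, zero_add]
  rfl

-- Dict algebra ------------------------------------------------------------------------------
lemma pvSum_map_replace (l : List ((Nat × Int) × Int)) (k : Nat × Int) (v old : Int)
    (f : Nat × Int → Int) (hnd : (l.map Prod.fst).Nodup) (hmem : (k, old) ∈ l) :
    ((l.map (fun p => if p.1 == k then (k, v) else p)).map (fun p => p.2 * f p.1)).sum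
      = (l.map (fun p => p.2 * f p.1)).sum - old * f k + v * f k := by
  induction l with
  | nil => simp at hmem
  | cons p rest ih =>
    simp only [List.map_cons, List.nodup_cons] at hnd
    by_cases hp : p.1 == k
    · have hpk : p.1 = k := by simpa using hp
      have hrest_no : k ∉ rest.map Prod.fst := hpk ▸ hnd.1
      have hpe : p = (k, old) := by
        rcases List.mem_cons.mp hmem with h | h
        · exact h.symm
        · exact absurd (by simpa using List.mem_map_of_mem (f := Prod.fst) h) hrest_no
      have hrest : rest.map (fun q => if q.1 == k then (k, v) else q) = rest := by
        conv_rhs => rw [← List.map_id rest]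
        apply List.map_congr_left
        intro q hq
        have : q.1 ≠ k := fun e => hrest_no (e ▸ List.mem_map_of_mem (f := Prod.fst) hq)
        simp [this]
      simp only [List.map_cons, hrest, List.sum_cons, hpe]
      simp only [beq_self_eq_true, if_true]
      ring
    · have hpk : (p.1 == k) = false := by simpa using hp
      have hmem' : (k, old) ∈ rest := by
        rcases List.mem_cons.mp hmem with h | h
        · exact absurd (congrArg Prod.fst h.symm) (by simpa using hp)
        · exact h
      simp only [List.map_cons, hpk, Bool.false_eq_true, if_false, List.sum_cons,
        ih hnd.2 hmem']
      ring

lemma pvW_insert_add (d : PySem.Dict (Nat × Int) Int) (k : Nat × Int) (c : Int)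
    (f : Nat × Int → Int) (hnd : d.keys.Nodup) :
    pvW (d.insert k (d.getD k 0 + c)) f = pvW d f + c * f k := by
  by_cases hc : d.contains k
  · obtain ⟨old, hold⟩ : ∃ v, d.get? k = some v := by
      rw [PySem.Dict.contains_eq_isSome_get?] at hc
      exact Option.isSome_iff_exists.mp hc
    have hmem : (k, old) ∈ d.items := PySem.Dict.mem_items_of_get?_eq_some d hold
    have hgd : d.getD k 0 = old := PySem.Dict.getD_of_mem_items d hmem hnd 0
    have hkeys : (d.items.map Prod.fst).Nodup := hnd
    rw [pvW, PySem.Dict.items_insert_of_contains d _ hc,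
      pvSum_map_replace d.items k (d.getD k 0 + c) old f hkeys hmem, hgd, ← pvW]
    ring
  · rw [pvW, PySem.Dict.items_insert_of_not_contains d _ (by simpa using hc),
      PySem.Dict.getD_of_not_contains d 0 (by simpa using hc)]
    simp [pvW]

-- The two ports spell the bit test differently: (m >> x) & 1 == 0 vs m & (1 << x) == 0.
lemma pvBit (m x : Nat) : ((m >>> x) &&& 1 = 0) ↔ (m &&& (1 <<< x) = 0) := by
  rw [Nat.and_one_is_mod, Nat.shiftRight_eq_div_pow, Nat.one_shiftLeft, Nat.and_two_pow]
  rcases h : m.testBit x <;> simp [Nat.testBit_eq_decide_div_mod_eq] at h <;> simp [h]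

lemma pvOk_iff (fset : List (Int × Int)) (m : Nat) (last : Int) (x : Nat) :
    pvOk fset m last x = true ↔
      ((m >>> x) &&& 1 = 0 ∧ (last = -1 ∨ (last, (x : Int)) ∉ fset)) := by
  simp only [pvOk, decide_eq_true_eq, pvBit]

-- Inner fold (over range(n)) of one parent state --------------------------------------------
lemma pvInner_nodup (fset : List (Int × Int)) (kv : (Nat × Int) × Int)
    (xs : List Nat) (acc : PySem.Dict (Nat × Int) Int) (hnd : acc.keys.Nodup) :
    ((xs.foldl (fun acc2 x =>
      if (kv.1.1 >>> x) &&& 1 = 0 ∧ (kv.1.2 = -1 ∨ (kv.1.2, (x : Int)) ∉ fset) then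
        acc2.insert (kv.1.1 ||| (1 <<< x), (x : Int))
          (acc2.getD (kv.1.1 ||| (1 <<< x), (x : Int)) 0 + kv.2)
      else acc2) acc)).keys.Nodup := by
  induction xs generalizing acc with
  | nil => exact hnd
  | cons x rest ih =>
    simp only [List.foldl_cons]
    split
    · exact ih _ (PySem.Dict.nodup_keys_insert _ _ _ hnd)
    · exact ih _ hnd

lemma pvInner_W (fset : List (Int × Int)) (kv : (Nat × Int) × Int)
    (xs : List Nat) (acc : PySem.Dict (Nat × Int) Int) (f : Nat × Int → Int)
    (hnd : acc.keys.Nodup) :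
    pvW (xs.foldl (fun acc2 x =>
      if (kv.1.1 >>> x) &&& 1 = 0 ∧ (kv.1.2 = -1 ∨ (kv.1.2, (x : Int)) ∉ fset) then
        acc2.insert (kv.1.1 ||| (1 <<< x), (x : Int))
          (acc2.getD (kv.1.1 ||| (1 <<< x), (x : Int)) 0 + kv.2)
      else acc2) acc) f
      = pvW acc f + kv.2 * (((xs.filter (pvOk fset kv.1.1 kv.1.2)).map
          (fun x => f (kv.1.1 ||| (1 <<< x), (x : Int)))).sum) := by
  induction xs generalizing acc with
  | nil => simp
  | cons x rest ih =>
    simp only [List.foldl_cons, List.filter_cons]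
    by_cases hg : (kv.1.1 >>> x) &&& 1 = 0 ∧ (kv.1.2 = -1 ∨ (kv.1.2, (x : Int)) ∉ fset)
    · rw [if_pos hg, ih _ (PySem.Dict.nodup_keys_insert _ _ _ hnd),
        pvW_insert_add _ _ _ _ hnd, if_pos ((pvOk_iff fset kv.1.1 kv.1.2 x).mpr hg)]
      simp only [List.map_cons, List.sum_cons]
      ring
    · rw [if_neg hg, ih _ hnd,
        if_neg (by simpa using fun h => hg ((pvOk_iff fset kv.1.1 kv.1.2 x).mp h))]

lemma pvInner_keys (fset : List (Int × Int)) (kv : (Nat × Int) × Int)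
    (xs : List Nat) (acc : PySem.Dict (Nat × Int) Int) (k : Nat × Int)
    (hk : k ∈ ((xs.foldl (fun acc2 x =>
      if (kv.1.1 >>> x) &&& 1 = 0 ∧ (kv.1.2 = -1 ∨ (kv.1.2, (x : Int)) ∉ fset) then
        acc2.insert (kv.1.1 ||| (1 <<< x), (x : Int))
          (acc2.getD (kv.1.1 ||| (1 <<< x), (x : Int)) 0 + kv.2)
      else acc2) acc)).keys) :
    k ∈ acc.keys ∨ ∃ x ∈ xs, pvOk fset kv.1.1 kv.1.2 x = true ∧
      k = (kv.1.1 ||| (1 <<< x), (x : Int)) := by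
  induction xs generalizing acc with
  | nil => exact Or.inl hk
  | cons x rest ih =>
    simp only [List.foldl_cons] at hk
    by_cases hg : (kv.1.1 >>> x) &&& 1 = 0 ∧ (kv.1.2 = -1 ∨ (kv.1.2, (x : Int)) ∉ fset)
    · rw [if_pos hg] at hk
      rcases ih _ hk with h | ⟨y, hy, hok, he⟩
      · rcases (PySem.Dict.mem_keys_insert _ _ _ _).mp h with h | h
        · exact Or.inr ⟨x, List.mem_cons_self, (pvOk_iff fset kv.1.1 kv.1.2 x).mpr hg, h⟩
        · exact Or.inl h
      · exact Or.inr ⟨y, List.mem_cons_of_mem _ hy, hok, he⟩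
    · rw [if_neg hg] at hk
      rcases ih _ hk with h | ⟨y, hy, hok, he⟩
      · exact Or.inl h
      · exact Or.inr ⟨y, List.mem_cons_of_mem _ hy, hok, he⟩

-- The step ----------------------------------------------------------------------------------
lemma pvStepB_nodup (N : Nat) (fset : List (Int × Int)) (d : PySem.Dict (Nat × Int) Int) :
    (pvStepB N fset d).keys.Nodup := by
  rw [pvStepB]
  have aux : ∀ (ps : List ((Nat × Int) × Int)) (acc : PySem.Dict (Nat × Int) Int),
      acc.keys.Nodup →
      (ps.foldl (fun acc (kv : (Nat × Int) × Int) =>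
        (List.range N).foldl (fun acc2 x =>
          if (kv.1.1 >>> x) &&& 1 = 0 ∧ (kv.1.2 = -1 ∨ (kv.1.2, (x : Int)) ∉ fset) then
            acc2.insert (kv.1.1 ||| (1 <<< x), (x : Int))
              (acc2.getD (kv.1.1 ||| (1 <<< x), (x : Int)) 0 + kv.2)
          else acc2) acc) acc).keys.Nodup := by
    intro ps
    induction ps with
    | nil => intro acc h; exact h
    | cons p rest ih =>
      intro acc h
      exact ih _ (pvInner_nodup fset p _ _ h)
  exact aux d.items _ PySem.Dict.nodup_keys_empty

lemma pvStepB_W (N : Nat) (fset : List (Int × Int)) (d : PySem.Dict (Nat × Int) Int)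
    (f : Nat × Int → Int) :
    pvW (pvStepB N fset d) f
      = (d.items.map (fun p =>
          p.2 * ((pvKids N fset p.1.1 p.1.2).map f).sum)).sum := by
  rw [pvStepB]
  have aux : ∀ (ps : List ((Nat × Int) × Int)) (acc : PySem.Dict (Nat × Int) Int),
      acc.keys.Nodup →
      pvW (ps.foldl (fun acc (kv : (Nat × Int) × Int) =>
        (List.range N).foldl (fun acc2 x =>
          if (kv.1.1 >>> x) &&& 1 = 0 ∧ (kv.1.2 = -1 ∨ (kv.1.2, (x : Int)) ∉ fset) then
            acc2.insert (kv.1.1 ||| (1 <<< x), (x : Int))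
              (acc2.getD (kv.1.1 ||| (1 <<< x), (x : Int)) 0 + kv.2)
          else acc2) acc) acc) f
        = pvW acc f + (ps.map (fun p =>
            p.2 * ((pvKids N fset p.1.1 p.1.2).map f).sum)).sum := by
    intro ps
    induction ps with
    | nil => intro acc h; simp
    | cons p rest ih =>
      intro acc h
      rw [List.foldl_cons, ih _ (pvInner_nodup fset p _ _ h),
        pvInner_W fset p _ _ f h]
      simp only [pvKids, List.map_map, List.map_cons, List.sum_cons]
      ring_nf
      rfl
  rw [aux d.items _ PySem.Dict.nodup_keys_empty]
  have : (PySem.Dict.empty : PySem.Dict (Nat × Int) Int).items = [] := rfl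
  simp [pvW, this]

lemma pvStepB_keys (N : Nat) (fset : List (Int × Int)) (d : PySem.Dict (Nat × Int) Int)
    (t : Nat) (hd : ∀ k ∈ d.keys, PySem.Int.bitCount ((k.1 : Nat) : Int) = t ∧ k.1 < 2 ^ N)
    (k : Nat × Int) (hk : k ∈ (pvStepB N fset d).keys) :
    PySem.Int.bitCount ((k.1 : Nat) : Int) = t + 1 ∧ k.1 < 2 ^ N := by
  rw [pvStepB] at hk
  have aux : ∀ (ps : List ((Nat × Int) × Int)) (acc : PySem.Dict (Nat × Int) Int),
      k ∈ (ps.foldl (fun acc (kv : (Nat × Int) × Int) =>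
        (List.range N).foldl (fun acc2 x =>
          if (kv.1.1 >>> x) &&& 1 = 0 ∧ (kv.1.2 = -1 ∨ (kv.1.2, (x : Int)) ∉ fset) then
            acc2.insert (kv.1.1 ||| (1 <<< x), (x : Int))
              (acc2.getD (kv.1.1 ||| (1 <<< x), (x : Int)) 0 + kv.2)
          else acc2) acc) acc).keys →
      k ∈ acc.keys ∨ ∃ p ∈ ps, ∃ x < N, pvOk fset p.1.1 p.1.2 x = true ∧
        k = (p.1.1 ||| (1 <<< x), (x : Int)) := by
    intro ps
    induction ps with
    | nil => intro acc h; exact Or.inl h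
    | cons p rest ih =>
      intro acc h
      rcases ih _ h with h' | ⟨q, hq, hx⟩
      · rcases pvInner_keys fset p _ _ _ h' with h'' | ⟨x, hx, hok, he⟩
        · exact Or.inl h''
        · exact Or.inr ⟨p, List.mem_cons_self, x, List.mem_range.mp hx, hok, he⟩
      · exact Or.inr ⟨q, List.mem_cons_of_mem _ hq, hx⟩
  rcases aux d.items _ hk with h | ⟨p, hp, x, hxN, hok, he⟩
  · simp [PySem.Dict.keys_empty] at h
  · obtain ⟨hpc, hlt⟩ := hd p.1 (PySem.Dict.mem_keys_of_mem_items d hp)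
    have hbit : p.1.1 &&& (1 <<< x) = 0 := ((pvOk_iff _ _ _ _).mp hok).1 |>.symm ▸
      (pvBit p.1.1 x).mp ((pvOk_iff _ _ _ _).mp hok).1
    have htb : p.1.1.testBit x = false := by
      simpa [Nat.one_shiftLeft, Nat.and_two_pow] using hbit
    have hpow : (1 <<< x : Nat) = 2 ^ x := Nat.one_shiftLeft x
    constructor
    · rw [he]
      simpa [hpow, hpc] using pvPc_or x p.1.1 htb
    · rw [he]
      exact Nat.or_lt_two_pow hlt (by
        rw [hpow]
        exact Nat.pow_lt_pow_right (by norm_num) hxN)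

-- The iteration -----------------------------------------------------------------------------
lemma pvIterB_sum (N : Nat) (r : Int) (fset : List (Int × Int)) (hr : 0 ≤ r) :
    ∀ (t s : Nat) (d : PySem.Dict (Nat × Int) Int), d.keys.Nodup →
      (∀ k ∈ d.keys, PySem.Int.bitCount ((k.1 : Nat) : Int) = s ∧ k.1 < 2 ^ N) →
      s + t = r.toNat →
      ((pvIterB N fset t d).values).sum = pvW d (fun k => pvDpA N r fset k.1 k.2) := by
  intro t
  induction t with
  | zero =>
    intro s d hnd hkeys hst
    rw [pvIterB]
    have hvals : d.values = d.items.map Prod.snd := rfl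
    rw [hvals, pvW]
    congr 1
    apply List.map_congr_left
    intro p hp
    have hk := hkeys p.1 (PySem.Dict.mem_keys_of_mem_items d hp)
    have hone : pvDpA N r fset p.1.1 p.1.2 = 1 := by
      rw [pvDpA, if_pos (by rw [hk.1]; omega)]
    rw [hone, mul_one]
  | succ t ih =>
    intro s d hnd hkeys hst
    rw [pvIterB, ih (s + 1) _ (pvStepB_nodup N fset d)
      (fun k hk => pvStepB_keys N fset d s hkeys k hk) (by omega), pvStepB_W]
    rw [pvW]
    congr 1
    apply List.map_congr_left
    intro p hp
    have hk := hkeys p.1 (PySem.Dict.mem_keys_of_mem_items d hp)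
    have hne : (PySem.Int.bitCount ((p.1.1 : Nat) : Int) : Int) ≠ r := by
      rw [hk.1]; omega
    rw [pvDpA_eq N r fset p.1.1 p.1.2 hne]

-- Zero lemma for r < 0 or r > N -------------------------------------------------------------
lemma pvDpA_zero (N : Nat) (r : Int) (fset : List (Int × Int))
    (hr : r < 0 ∨ (N : Int) < r) :
    ∀ (u : Nat) (mask : Nat) (last : Int), pvUnusedA N mask ≤ u → mask < 2 ^ N →
      pvDpA N r fset mask last = 0 := by
  intro u
  induction u with
  | zero =>
    intro mask last hu hlt
    have hle := pvPc_le N mask hlt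
    rw [pvDpA_eq N r fset mask last (by rcases hr with h | h <;> omega)]
    apply List.sum_eq_zero
    intro y hy
    simp only [pvKids, List.mem_map] at hy
    obtain ⟨k, ⟨x, hxf, hke⟩, hye⟩ := hy
    subst hke
    subst hye
    have hxf' := List.mem_filter.mp hxf
    have hxN : x < N := List.mem_range.mp hxf'.1
    have hbit : mask &&& (1 <<< x) = 0 := (of_decide_eq_true hxf'.2).1
    have := pvUnusedA_lt N mask x hxN hbit
    omega
  | succ u ih =>
    intro mask last hu hlt
    have hle := pvPc_le N mask hlt
    rw [pvDpA_eq N r fset mask last (by rcases hr with h | h <;> omega)]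
    apply List.sum_eq_zero
    intro y hy
    simp only [pvKids, List.mem_map] at hy
    obtain ⟨k, ⟨x, hxf, hke⟩, hye⟩ := hy
    subst hke
    subst hye
    have hxf' := List.mem_filter.mp hxf
    have hxN : x < N := List.mem_range.mp hxf'.1
    have hbit : mask &&& (1 <<< x) = 0 := (of_decide_eq_true hxf'.2).1
    have hlt2 : mask ||| (1 <<< x) < 2 ^ N := by
      rw [Nat.one_shiftLeft]
      exact Nat.or_lt_two_pow hlt (Nat.pow_lt_pow_right (by norm_num) hxN)
    have := pvUnusedA_lt N mask x hxN hbit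
    exact ih (mask ||| (1 <<< x)) (x : Int) (by omega) hlt2

-- ===== VERDICT (by name: the statement is the Claim_ definition above) =====
theorem arrangements_with_forbidden_spec : Claim_equal_arrangements_with_forbidden := by
  intro n r fps _ hpre
  unfold Spec_arrangements_with_forbidden arrangements_with_forbidden
    arrangements_with_forbidden_alt
  rcases hpre with hr0 | ⟨hr1, hrn, _⟩ | ⟨hout, _⟩
  · -- r = 0: both sides are 1
    subst hr0
    rw [if_pos rfl, pvDpA, if_pos (by decide)]
  · -- 1 ≤ r ≤ n: the level-DP invariant
    rw [if_neg (by omega), if_neg (by omega)]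
    have hr : 0 ≤ r := by omega
    have := pvIterB_sum n.toNat r (PySem.Set.ofList fps) hr r.toNat 0
      (PySem.Dict.ofList [((0, -1), 1)]) (PySem.Dict.nodup_keys_ofList _)
      (by
        intro k hk
        have hkeys : (PySem.Dict.ofList [(((0 : Nat), (-1 : Int)), (1 : Int))]).keys
            = [(0, -1)] := by decide
        rw [hkeys] at hk
        rw [List.mem_singleton.mp hk]
        exact ⟨by decide, Nat.two_pow_pos n.toNat⟩)
      (by omega)
    rw [this]
    have : pvW (PySem.Dict.ofList [((0, -1), 1)])
        (fun k => pvDpA n.toNat r (PySem.Set.ofList fps) k.1 k.2)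
        = pvDpA n.toNat r (PySem.Set.ofList fps) 0 (-1) := by
      have hitems : (PySem.Dict.ofList [(((0 : Nat), (-1 : Int)), (1 : Int))]).items
          = [((0, -1), 1)] := by decide
      simp [pvW, hitems]
    rw [this]
  · -- r ≠ 0 outside 1..n (after the r = 0 branch): both sides are 0
    by_cases hr0 : r = 0
    · subst hr0
      rw [if_pos rfl, pvDpA, if_pos (by decide)]
    · rw [if_neg hr0, if_pos (by omega)]
      exact pvDpA_zero n.toNat r (PySem.Set.ofList fps) (by omega)
        (pvUnusedA n.toNat 0) 0 (-1) le_rfl (Nat.two_pow_pos n.toNat)
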